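-- pv_equiv track=rewrite | github.com/DataArtifex/rdf-toolkit | rdflib/__init__.py | _split_triple
-- ===== SOURCE A (Python) =====
-- from typing import Any, Dict, Iterable, Iterator, List, Optional, Tuple
--
-- def _split_triple(line: str) -> Tuple[str, str, str]:
--     tokens: List[str] = []
--     current: List[str] = []
--     in_quote = False
--     escape = False
--     for char in line:
--         if in_quote:
--             current.append(char)
--             if escape:
--                 escape = False
--             elif char == "\\":
--                 escape = True
--             elif char == '"':
--                 in_quote = False
--         else:
--             if char == '"':
--                 in_quote = True
--                 current.append(char)
--             elif char in {" ", "\t"}: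
--                 if current:
--                     tokens.append("".join(current))
--                     current = []
--             else:
--                 current.append(char)
--     if current:
--         tokens.append("".join(current))
--     if len(tokens) < 3:
--         raise ValueError(f"Unable to parse triple from line: {line}")
--     subject = tokens[0]
--     predicate = tokens[1]
--     obj = " ".join(tokens[2:])
--     return subject, predicate, obj
-- ===== SOURCE B (Python) =====
-- from typing import Tuple
--
-- def _split_triple(line: str) -> Tuple[str, str, str]:
--     # Recursive-descent style tokenizer over a character iterator:
--     # skip whitespace, then consume one token (entering a quoted run when a
--     # '"' is met), instead of a flat per-character state machine with
--     # in_quote/escape booleans.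
--     tokens = []
--     it = iter(line)
--     c = next(it, None)
--     while c is not None:
--         if c in ' \t':
--             c = next(it, None)
--             continue
--         buf = []
--         while c is not None and c not in ' \t':
--             buf.append(c)
--             if c == '"':
--                 # consume the quoted body up to the unescaped closing quote
--                 c = next(it, None)
--                 while c is not None:
--                     buf.append(c)
--                     if c == '\\':
--                         c = next(it, None)
--                         if c is not None:
--                             buf.append(c)
--                     elif c == '"':
--                         break
--                     c = next(it, None)
--             c = next(it, None)
--         tokens.append(''.join(buf))
--     if len(tokens) < 3:
--         raise ValueError(f"Unable to parse triple from line: {line}")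
--     return tokens[0], tokens[1], ' '.join(tokens[2:])
-- ===== Notes on version B (the rewrite author's own statement) =====
-- stated objective: alternative
-- what changed: Replaced A's flat per-character state machine with in_quote/escape booleans by an iterator-consuming recursive-descent tokenizer (skip whitespace, consume one token, entering a dedicated quoted-run loop on '"'), with no mode booleans.
import Mathlib
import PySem

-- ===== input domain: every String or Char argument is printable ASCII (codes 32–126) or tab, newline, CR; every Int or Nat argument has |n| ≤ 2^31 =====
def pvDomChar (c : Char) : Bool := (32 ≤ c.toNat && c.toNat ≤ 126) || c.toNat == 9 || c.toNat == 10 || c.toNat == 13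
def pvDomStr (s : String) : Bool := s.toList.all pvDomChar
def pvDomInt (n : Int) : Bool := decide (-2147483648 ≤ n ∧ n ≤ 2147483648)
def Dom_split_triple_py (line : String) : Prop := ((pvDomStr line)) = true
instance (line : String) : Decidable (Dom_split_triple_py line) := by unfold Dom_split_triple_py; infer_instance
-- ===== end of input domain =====

-- B replaces A's flat per-character state machine (in_quote/escape booleans)
-- with an iterator-consuming recursive-descent tokenizer (skip whitespace,
-- consume one token, diving into a quoted run on '"'); objective: alternative.
-- Tokens are kept as char lists and joined to String at the end (Python joins
-- at token boundaries), which yields the same strings.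

def wsC (c : Char) : Bool := c = ' ' || c = '\t'

-- ===== PORT A =====
-- the loop body of A: state = (tokens, current, in_quote, escape)
def stepA (σ : List (List Char) × List Char × Bool × Bool) (ch : Char) :
    List (List Char) × List Char × Bool × Bool :=
  let (toks, cur, inq, esc) := σ
  if inq then
    let cur := cur ++ [ch]
    if esc then (toks, cur, true, false)
    else if ch = '\\' then (toks, cur, true, true)
    else if ch = '"' then (toks, cur, false, esc)
    else (toks, cur, true, esc)
  else
    if ch = '"' then (toks, cur ++ [ch], true, esc)
    else if wsC ch then (if cur = [] then (toks, cur, false, esc) else (toks ++ [cur], [], false, esc))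
    else (toks, cur ++ [ch], false, esc)

def split_triple_py (line : String) : String × String × String :=
  let st := line.toList.foldl stepA ([], [], false, false)
  let tokens := st.1 ++ (if st.2.1 = [] then [] else [st.2.1])  -- final 'if current: tokens.append'
  if tokens.length < 3 then ("", "", "")   -- A raises ValueError here; excluded by Pre_
  else (String.ofList tokens[0]!, String.ofList tokens[1]!,
        String.ofList (List.intercalate [' '] (tokens.drop 2)))

-- ===== PORT B =====
-- Python's iterator is modelled by (c, it) with next = (it.head?, it.tail).
-- The loops carry a fuel : Nat as a pure totality guard (each iteration
-- consumes input, so fuel = |line| + 1 is never exhausted; proved below).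

-- inner quoted-run loop of B
def qloop (fuel : Nat) (buf : List Char) (c : Option Char) (it : List Char) :
    List Char × List Char :=
  match c with
  | none => (buf, it)
  | some ch =>
    match fuel with
    | 0 => (buf, it)   -- never reached with fuel > |input|
    | fuel + 1 =>
      let buf1 := buf ++ [ch]
      if ch = '\\' then
        let buf2 := match it.head? with | some d => buf1 ++ [d] | none => buf1
        qloop fuel buf2 it.tail.head? it.tail.tail
      else if ch = '"' then (buf1, it)
      else qloop fuel buf1 it.head? it.tail

-- token loop of B: returns (buf, the char that ended the loop, rest of iterator)
def tokloop (fuel : Nat) (buf : List Char) (c : Option Char) (it : List Char) :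
    List Char × Option Char × List Char :=
  match c with
  | none => (buf, none, it)
  | some ch =>
    if wsC ch then (buf, some ch, it)
    else
      match fuel with
      | 0 => (buf, some ch, it)   -- never reached with fuel > |input|
      | fuel + 1 =>
        let buf1 := buf ++ [ch]
        if ch = '"' then
          let p := qloop fuel buf1 it.head? it.tail
          tokloop fuel p.1 p.2.head? p.2.tail
        else tokloop fuel buf1 it.head? it.tail

-- outer loop of B
def mainloop (fuel : Nat) (tokens : List (List Char)) (c : Option Char) (it : List Char) :
    List (List Char) :=
  match c with
  | none => tokens
  | some ch =>
    match fuel with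
    | 0 => tokens   -- never reached with fuel > |input|
    | fuel + 1 =>
      if wsC ch then mainloop fuel tokens it.head? it.tail
      else
        let r := tokloop (fuel + 1) [] (some ch) it
        mainloop fuel (tokens ++ [r.1]) r.2.1 r.2.2

def split_triple_py_alt (line : String) : String × String × String :=
  let s := line.toList
  let tokens := mainloop (s.length + 1) [] s.head? s.tail
  if tokens.length < 3 then ("", "", "")   -- B raises ValueError here; excluded by Pre_
  else (String.ofList tokens[0]!, String.ofList tokens[1]!,
        String.ofList (List.intercalate [' '] (tokens.drop 2)))

-- ===== PRECONDITION & SPEC =====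
-- One-pass counting automaton: the number of quote-aware tokens of the line
-- (a token starts at an unquoted non-whitespace character; a quoted run,
-- with backslash escapes, shields whitespace).  Used only to state Pre_.
def preStep (st : Nat × Bool × Bool × Bool) (c : Char) : Nat × Bool × Bool × Bool :=
  let (n, q, e, t) := st
  if q then
    if e then (n, q, false, t)
    else if c = '\\' then (n, q, true, t)
    else if c = '"' then (n, false, e, t)
    else (n, q, e, t)
  else if c = '"' then (if t then (n, true, e, t) else (n + 1, true, e, true))
  else if wsC c then (n, q, e, false)
  else (if t then (n, q, e, t) else (n + 1, q, e, true))

def tokenCount (cs : List Char) : Nat := (cs.foldl preStep (0, false, false, false)).1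

-- Pre_ excludes exactly the lines with fewer than three tokens, on which A raises ValueError.
def Pre_split_triple_py (line : String) : Prop := 3 ≤ tokenCount line.toList
instance (line : String) : Decidable (Pre_split_triple_py line) := by
  unfold Pre_split_triple_py; infer_instance

def pvWitness_split_triple_py : String := "<a> <b> \"c d\" ."

def Spec_split_triple_py (line : String) (out : String × String × String) : Prop :=
  out = split_triple_py_alt line
instance (line : String) (out : String × String × String) :
    Decidable (Spec_split_triple_py line out) := by unfold Spec_split_triple_py; infer_instance

-- ===== CLAIM (what is proved, stated in full; the proofs are below) =====
def Claim_equal_split_triple_py : Prop :=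
  ∀ (line : String), Dom_split_triple_py line → Pre_split_triple_py line →
    Spec_split_triple_py line (split_triple_py line)

-- ===== LEMMAS AND PROOFS =====

def finalizeA (σ : List (List Char) × List Char × Bool × Bool) : List (List Char) :=
  σ.1 ++ (if σ.2.1 = [] then [] else [σ.2.1])

-- Specification tokenizer (pair-style), the proof-side middle-man.
-- span of a quoted run after the opening quote: (consumed chars, rest)
def qspan : List Char → List Char × List Char
  | [] => ([], [])
  | '\\' :: cs =>
      match cs with
      | [] => (['\\'], [])
      | d :: cs' => ('\\' :: d :: (qspan cs').1, (qspan cs').2)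
  | '"' :: cs => (['"'], cs)
  | c :: cs => (c :: (qspan cs).1, (qspan cs).2)

theorem qspan_snd_le (cs : List Char) : (qspan cs).2.length ≤ cs.length := by
  fun_induction qspan cs <;> simp_all <;> omega

-- span of one whole token (stops at unquoted whitespace or end)
def tspan : List Char → List Char × List Char
  | [] => ([], [])
  | c :: cs =>
    if wsC c then ([], c :: cs)
    else if c = '"' then
      (c :: ((qspan cs).1 ++ (tspan (qspan cs).2).1), (tspan (qspan cs).2).2)
    else
      (c :: (tspan cs).1, (tspan cs).2)
termination_by cs => cs.length
decreasing_by
  · have := qspan_snd_le cs; simp only [List.length_cons]; omega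
  · simp

theorem tspan_snd_le (cs : List Char) : (tspan cs).2.length ≤ cs.length := by
  fun_induction tspan cs with
  | case1 => simp
  | case2 d cs h => simp
  | case3 cs _h ih => have h1 := qspan_snd_le cs; simp_all; omega
  | case4 d cs h1 h2 ih => simp_all; omega

theorem tspan_snd_lt (c : Char) (cs : List Char) (h : ¬ wsC c = true) :
    (tspan (c :: cs)).2.length < (c :: cs).length := by
  rw [tspan, if_neg h]
  by_cases hq : c = '"'
  · rw [if_pos hq]
    have h1 := tspan_snd_le (qspan cs).2
    have h2 := qspan_snd_le cs
    show (tspan (qspan cs).2).2.length < (c :: cs).length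
    simp only [List.length_cons]
    omega
  · rw [if_neg hq]
    have h1 := tspan_snd_le cs
    show (tspan cs).2.length < (c :: cs).length
    simp only [List.length_cons]
    omega

-- tokenisation as a list of tokens
def specTokens : List Char → List (List Char)
  | [] => []
  | c :: cs =>
    if h : wsC c then specTokens cs
    else
      (tspan (c :: cs)).1 :: specTokens (tspan (c :: cs)).2
termination_by cs => cs.length
decreasing_by
  · simp
  · have := tspan_snd_lt c cs h; simpa using this

-- B's qloop consumes exactly the qspan of the remaining characters
theorem qloop_eq (cs : List Char) : ∀ buf fuel, cs.length < fuel →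
    qloop fuel buf cs.head? cs.tail = (buf ++ (qspan cs).1, (qspan cs).2) := by
  fun_induction qspan cs with
  | case1 => intro buf fuel hf; simp [qloop]
  | case2 =>
      intro buf fuel hf
      obtain ⟨f, rfl⟩ : ∃ f, fuel = f + 1 := ⟨fuel - 1, by omega⟩
      simp [qloop]
  | case3 d cs ih =>
      intro buf fuel hf
      obtain ⟨f, rfl⟩ : ∃ f, fuel = f + 1 := ⟨fuel - 1, by omega⟩
      simp only [List.head?_cons, List.tail_cons, qloop]
      simp only [if_true]
      rw [ih (buf ++ ['\\'] ++ [d]) f (by simp at hf ⊢; omega)]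
      simp
  | case4 cs =>
      intro buf fuel hf
      obtain ⟨f, rfl⟩ : ∃ f, fuel = f + 1 := ⟨fuel - 1, by omega⟩
      simp [qloop]
  | case5 c cs h1 h2 ih =>
      intro buf fuel hf
      obtain ⟨f, rfl⟩ : ∃ f, fuel = f + 1 := ⟨fuel - 1, by omega⟩
      rw [show (c :: cs).head? = some c from rfl, show (c :: cs).tail = cs from rfl]
      rw [qloop]
      rw [if_neg h1, if_neg h2]
      rw [ih (buf ++ [c]) f (by simp at hf ⊢; omega)]
      simp

theorem tokloop_eq (cs : List Char) : ∀ buf fuel, cs.length < fuel →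
    tokloop fuel buf cs.head? cs.tail
      = (buf ++ (tspan cs).1, (tspan cs).2.head?, (tspan cs).2.tail) := by
  fun_induction tspan cs with
  | case1 => intro buf fuel hf; simp [tokloop]
  | case2 d cs h =>
      intro buf fuel hf
      obtain ⟨f, rfl⟩ : ∃ f, fuel = f + 1 := ⟨fuel - 1, by omega⟩
      simp [tokloop, h]
  | case3 cs h ih =>
      intro buf fuel hf
      obtain ⟨f, rfl⟩ : ∃ f, fuel = f + 1 := ⟨fuel - 1, by omega⟩
      simp only [List.head?_cons, List.tail_cons, tokloop]
      rw [if_neg h]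
      simp only [if_true]
      rw [qloop_eq cs (buf ++ ['"']) f (by simp at hf ⊢; omega)]
      rw [ih _ f (by have := qspan_snd_le cs; simp at hf ⊢; omega)]
      simp
  | case4 d cs h1 h2 ih =>
      intro buf fuel hf
      obtain ⟨f, rfl⟩ : ∃ f, fuel = f + 1 := ⟨fuel - 1, by omega⟩
      simp only [List.head?_cons, List.tail_cons, tokloop]
      rw [if_neg h1, if_neg h2]
      rw [ih _ f (by simp at hf ⊢; omega)]
      simp

theorem mainloop_eq (cs : List Char) : ∀ toks fuel, cs.length < fuel →
    mainloop fuel toks cs.head? cs.tail = toks ++ specTokens cs := by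
  fun_induction specTokens cs with
  | case1 => intro toks fuel hf; simp [mainloop]
  | case2 c cs h ih =>
      intro toks fuel hf
      obtain ⟨f, rfl⟩ : ∃ f, fuel = f + 1 := ⟨fuel - 1, by omega⟩
      simp only [List.head?_cons, List.tail_cons]
      rw [mainloop]
      simp only [h, if_true]
      exact ih toks f (by simp at hf ⊢; omega)
  | case3 c cs h ih =>
      intro toks fuel hf
      obtain ⟨f, rfl⟩ : ∃ f, fuel = f + 1 := ⟨fuel - 1, by omega⟩
      simp only [List.head?_cons, List.tail_cons]
      rw [mainloop]
      rw [if_neg h]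
      have key := tokloop_eq (c :: cs) [] (f + 1) (by simpa using hf)
      simp only [List.head?_cons, List.tail_cons, List.nil_append] at key
      simp only [key]
      rw [ih _ f (by have := tspan_snd_lt c cs h; simp at this hf ⊢; omega)]
      simp

theorem foldA_quote (cs : List Char) : ∀ toks cur,
    finalizeA (List.foldl stepA (toks, cur, true, false) cs)
      = finalizeA (List.foldl stepA (toks, cur ++ (qspan cs).1, false, false) (qspan cs).2) := by
  fun_induction qspan cs with
  | case1 => intro toks cur; simp [finalizeA]
  | case2 => intro toks cur; simp [stepA, finalizeA]
  | case3 d cs ih =>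
      intro toks cur
      simp only [List.foldl_cons]
      rw [show stepA (toks, cur, true, false) '\\' = (toks, cur ++ ['\\'], true, true) from by
        simp [stepA]]
      rw [show stepA (toks, cur ++ ['\\'], true, true) d
            = (toks, cur ++ ['\\'] ++ [d], true, false) from by simp [stepA]]
      rw [ih]
      simp
  | case4 cs => intro toks cur; simp [stepA]
  | case5 c cs h1 h2 ih =>
      intro toks cur
      simp only [List.foldl_cons]
      rw [show stepA (toks, cur, true, false) c = (toks, cur ++ [c], true, false) from by
        simp [stepA, eq_false h1, eq_false h2]]
      rw [ih]
      simp

theorem foldA_token (cs : List Char) : ∀ toks cur,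
    finalizeA (List.foldl stepA (toks, cur, false, false) cs)
      = finalizeA (List.foldl stepA (toks, cur ++ (tspan cs).1, false, false) (tspan cs).2) := by
  fun_induction tspan cs with
  | case1 => intro toks cur; simp
  | case2 d cs h => intro toks cur; simp
  | case3 cs h ih =>
      intro toks cur
      simp only [List.foldl_cons]
      rw [show stepA (toks, cur, false, false) '"' = (toks, cur ++ ['"'], true, false) from by
        simp [stepA]]
      rw [foldA_quote cs]
      rw [ih]
      simp
  | case4 d cs h1 h2 ih =>
      intro toks cur
      simp only [List.foldl_cons]
      rw [show stepA (toks, cur, false, false) d = (toks, cur ++ [d], false, false) from by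
        simp [stepA, h1, h2]]
      rw [ih]
      simp

theorem tspan_rest_shape (cs : List Char) :
    (tspan cs).2 = [] ∨ ∃ d r', (tspan cs).2 = d :: r' ∧ wsC d = true := by
  fun_induction tspan cs with
  | case1 => left; rfl
  | case2 d cs h => right; exact ⟨d, cs, rfl, by simpa using h⟩
  | case3 cs h ih => simpa using ih
  | case4 d cs h1 h2 ih => simpa using ih

theorem tspan_fst_ne (c : Char) (cs : List Char) (h : ¬ wsC c = true) :
    (tspan (c :: cs)).1 ≠ [] := by
  rw [tspan, if_neg h]
  by_cases hq : c = '"' <;> simp [hq]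

theorem foldA_eq (cs : List Char) : ∀ toks,
    finalizeA (List.foldl stepA (toks, [], false, false) cs) = toks ++ specTokens cs := by
  fun_induction specTokens cs with
  | case1 => intro toks; simp [finalizeA]
  | case2 c cs h ih =>
      intro toks
      have hne : ¬ c = '"' := by rintro rfl; simp [wsC] at h
      simp only [List.foldl_cons]
      rw [show stepA (toks, [], false, false) c = (toks, [], false, false) from by
        simp [stepA, h, hne]]
      exact ih toks
  | case3 c cs h ih =>
      intro toks
      have hstep := foldA_token (c :: cs) toks []
      simp only [List.nil_append] at hstep
      rw [hstep]
      have hne := tspan_fst_ne c cs h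
      rcases tspan_rest_shape (c :: cs) with hr | ⟨d, r', hr, hd⟩
      · rw [hr]
        simp [finalizeA, hne, specTokens]
      · have hne' : ¬ d = '"' := by rintro rfl; simp [wsC] at hd
        rw [hr]
        simp only [List.foldl_cons]
        rw [show stepA (toks, (tspan (c :: cs)).1, false, false) d
              = (toks ++ [(tspan (c :: cs)).1], [], false, false) from by
          simp [stepA, hd, hne', hne]]
        have h2 := ih (toks ++ [(tspan (c :: cs)).1])
        rw [hr] at h2
        simp only [List.foldl_cons] at h2
        rw [show stepA (toks ++ [(tspan (c :: cs)).1], [], false, false) d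
              = (toks ++ [(tspan (c :: cs)).1], [], false, false) from by
          simp [stepA, hd, hne']] at h2
        rw [h2]
        simp

-- ===== VERDICT (by name: the statement is the Claim_ definition above) =====
theorem split_triple_py_spec : Claim_equal_split_triple_py := by
  intro line _ _
  show split_triple_py line = split_triple_py_alt line
  have hA := foldA_eq line.toList []
  have hB := mainloop_eq line.toList [] (line.toList.length + 1) (Nat.lt_succ_self _)
  simp only [finalizeA, List.nil_append] at hA hB
  simp only [split_triple_py, split_triple_py_alt]
  rw [hA, hB]
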